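-- pv_equiv track=rewrite | github.com/Raspeball/Project-Euler | py_source/projecteuler35.py | FullRotationPrimeCheck
-- ===== SOURCE A (Python) =====
-- def FullRotationPrimeCheck(n):
--
--     if n == 2:
--         return True
--
--     else:
--         for i in range(0, 9, 2):
--             if str(i) in str(n):
--                 return False
--
--         return True
-- ===== SOURCE B (Python) =====
-- def FullRotationPrimeCheck(n):
--     if n == 2:
--         return True
--     if n == 0:
--         return False
--     m = -n if n < 0 else n
--     while m > 0:
--         if (m % 10) % 2 == 0:
--             return False
--         m //= 10
--     return True
-- ===== Notes on version B (the rewrite author's own statement) =====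
-- stated objective: alternative
-- what changed: Replaces building str(n) and substring-searching it for each of the five even-digit characters with an arithmetic loop that extracts decimal digits by mod/div by ten (with an explicit zero guard before the loop).
import Mathlib
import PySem

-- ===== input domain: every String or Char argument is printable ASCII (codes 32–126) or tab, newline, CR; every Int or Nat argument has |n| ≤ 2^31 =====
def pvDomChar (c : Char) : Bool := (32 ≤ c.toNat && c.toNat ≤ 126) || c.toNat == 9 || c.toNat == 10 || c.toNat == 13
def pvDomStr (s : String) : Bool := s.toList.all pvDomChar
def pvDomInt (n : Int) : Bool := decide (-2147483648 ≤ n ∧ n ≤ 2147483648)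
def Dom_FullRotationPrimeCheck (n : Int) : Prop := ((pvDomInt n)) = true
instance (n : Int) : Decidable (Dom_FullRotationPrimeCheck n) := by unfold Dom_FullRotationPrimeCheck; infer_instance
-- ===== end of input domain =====

-- B replaces str(n) substring searches for even-digit characters by an arithmetic %10 // 10 digit loop (alternative decomposition).

-- ===== PORT A =====
-- the 'for i in range(0, 9, 2): if str(i) in str(n): return False' loop
def pvALoop (n : Int) : List Int → Bool
  | [] => true
  | i :: rest =>
    if PySem.Str.isIn (PySem.Int.toStr i) (PySem.Int.toStr n) then false
    else pvALoop n rest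

def FullRotationPrimeCheck (n : Int) : Bool :=
  if n == 2 then true
  else pvALoop n (PySem.List.pyRange 0 9 2)

-- ===== PORT B =====
-- the 'while m > 0' digit loop of Source B
def pvBLoop : Nat → Bool
  | 0 => true
  | m + 1 =>
    if (m + 1) % 10 % 2 == 0 then false
    else pvBLoop ((m + 1) / 10)
decreasing_by exact Nat.div_lt_self (Nat.succ_pos m) (by omega)

def FullRotationPrimeCheck_alt (n : Int) : Bool :=
  if n == 2 then true
  else if n == 0 then false
  else pvBLoop (if n < 0 then (-n).toNat else n.toNat)

-- ===== PRECONDITION & SPEC =====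
def Spec_FullRotationPrimeCheck (n : Int) (out : Bool) : Prop := out = FullRotationPrimeCheck_alt n
instance (n : Int) (out : Bool) : Decidable (Spec_FullRotationPrimeCheck n out) := by unfold Spec_FullRotationPrimeCheck; infer_instance

-- ===== CLAIM (what is proved, stated in full; the proofs are below) =====
def Claim_equal_FullRotationPrimeCheck : Prop := ∀ (n : Int), Dom_FullRotationPrimeCheck n → Spec_FullRotationPrimeCheck n (FullRotationPrimeCheck n)

-- ===== LEMMAS AND PROOFS =====

-- a char is one of the five even decimal digit characters
def pvEvenChar (c : Char) : Bool := c == '0' || c == '2' || c == '4' || c == '6' || c == '8'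

lemma pvALoop_true_iff (n : Int) (l : List Int) :
    pvALoop n l = true ↔ ∀ i ∈ l, PySem.Str.isIn (PySem.Int.toStr i) (PySem.Int.toStr n) = false := by
  induction l with
  | nil => simp [pvALoop]
  | cons i rest ih =>
    rw [pvALoop]
    by_cases h : PySem.Str.isIn (PySem.Int.toStr i) (PySem.Int.toStr n) = true
    · rw [if_pos h]
      simp only [List.forall_mem_cons]
      constructor
      · intro hh; exact absurd hh (by simp)
      · rintro ⟨h1, -⟩; rw [h] at h1; cases h1
    · rw [if_neg h, ih]
      simp only [List.forall_mem_cons, Bool.eq_false_iff.mpr h, true_and]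

lemma pv_singleton_infix {c : Char} {l : List Char} : [c] <:+: l ↔ c ∈ l := by
  constructor
  · intro h; exact h.sublist.subset (by simp)
  · intro h
    obtain ⟨s, t, rfl⟩ := List.append_of_mem h
    exact ⟨s, t, by simp⟩

lemma pv_isIn_single (c : Char) (n : Int) :
    PySem.Str.isIn (String.ofList [c]) (PySem.Int.toStr n) = ((PySem.Int.toChars n).contains c) := by
  rw [Bool.eq_iff_iff, PySem.Str.isIn_iff_infix, PySem.Int.toList_toStr]
  have h1 : (String.ofList [c]).toList = [c] := by simp
  rw [h1, pv_singleton_infix]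
  simp

lemma pv_key : ∀ f n acc, n < f → 0 < n →
    (Nat.toDigitsCore 10 f n acc).any pvEvenChar = (!pvBLoop n || acc.any pvEvenChar) := by
  intro f
  induction f with
  | zero => intro n acc h; omega
  | succ f ih =>
    intro n acc hf hn
    obtain ⟨m, rfl⟩ : ∃ m, n = m + 1 := ⟨n - 1, by omega⟩
    have hd : pvEvenChar ((m + 1) % 10).digitChar = decide ((m + 1) % 10 % 2 = 0) := by
      have h10 : (m + 1) % 10 < 10 := Nat.mod_lt _ (by omega)
      interval_cases h : (m + 1) % 10 <;> simp_all [pvEvenChar, Nat.digitChar]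
    have hstep : Nat.toDigitsCore 10 (f + 1) (m + 1) acc
        = if (m + 1) / 10 = 0 then ((m + 1) % 10).digitChar :: acc
          else Nat.toDigitsCore 10 f ((m + 1) / 10) (((m + 1) % 10).digitChar :: acc) := by
      simp [Nat.toDigitsCore]
    have hb : pvBLoop (m + 1)
        = if (m + 1) % 10 % 2 == 0 then false else pvBLoop ((m + 1) / 10) := by
      rw [pvBLoop]
    by_cases h0 : (m + 1) / 10 = 0
    · rw [hstep, if_pos h0]
      have hz0 : pvBLoop 0 = true := by simp [pvBLoop]
      have hz : pvBLoop ((m + 1) / 10) = true := by rw [h0]; exact hz0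
      cases hh : ((m + 1) % 10 % 2 == 0) <;>
        simp_all [List.any_cons]
    · rw [hstep, if_neg h0, ih _ _ (by omega) (by omega)]
      cases hh : ((m + 1) % 10 % 2 == 0) <;>
        simp_all [List.any_cons, Bool.or_comm]

lemma pv_hasEven_toDigits (m : Nat) (hm : 0 < m) :
    (Nat.toDigits 10 m).any pvEvenChar = !pvBLoop m := by
  rw [Nat.toDigits, pv_key (m + 1) m [] (by omega) hm]; simp

lemma pv_hasEven_toChars (n : Int) (hn : n ≠ 0) :
    (PySem.Int.toChars n).any pvEvenChar = !pvBLoop n.natAbs := by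
  have hpos : 0 < n.natAbs := Int.natAbs_pos.mpr hn
  unfold PySem.Int.toChars
  by_cases h : n < 0
  · rw [if_pos h]
    have hm : pvEvenChar '-' = false := by decide
    simp [hm, pv_hasEven_toDigits _ hpos]
  · rw [if_neg h]
    have ht : n.toNat = n.natAbs := by omega
    rw [ht, pv_hasEven_toDigits _ hpos]

lemma pv_main (n : Int) (h0 : n ≠ 0) :
    pvALoop n (PySem.List.pyRange 0 9 2) = pvBLoop (if n < 0 then (-n).toNat else n.toNat) := by
  have hr : PySem.List.pyRange 0 9 2 = [0, 2, 4, 6, 8] := by decide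
  have habs : (if n < 0 then (-n).toNat else n.toNat) = n.natAbs := by
    split <;> omega
  rw [hr, habs, Bool.eq_iff_iff, pvALoop_true_iff]
  have h0' : PySem.Int.toStr 0 = String.ofList ['0'] := by decide
  have h2' : PySem.Int.toStr 2 = String.ofList ['2'] := by decide
  have h4' : PySem.Int.toStr 4 = String.ofList ['4'] := by decide
  have h6' : PySem.Int.toStr 6 = String.ofList ['6'] := by decide
  have h8' : PySem.Int.toStr 8 = String.ofList ['8'] := by decide
  have hB : pvBLoop n.natAbs = !((PySem.Int.toChars n).any pvEvenChar) := by
    rw [pv_hasEven_toChars n h0]; simp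
  rw [hB]
  simp only [List.forall_mem_cons, h0', h2', h4', h6', h8',
    pv_isIn_single, Bool.not_eq_true', List.any_eq_false, pvEvenChar,
    List.contains_eq_mem, decide_eq_false_iff_not, Bool.or_eq_true, beq_iff_eq, not_or]
  constructor
  · rintro ⟨a0, a2, a4, a6, a8, -⟩ c hc
    exact ⟨⟨⟨⟨fun h => a0 (h ▸ hc), fun h => a2 (h ▸ hc)⟩, fun h => a4 (h ▸ hc)⟩,
      fun h => a6 (h ▸ hc)⟩, fun h => a8 (h ▸ hc)⟩
  · intro h
    exact ⟨fun hm => (h _ hm).1.1.1.1 rfl, fun hm => (h _ hm).1.1.1.2 rfl,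
      fun hm => (h _ hm).1.1.2 rfl, fun hm => (h _ hm).1.2 rfl,
      fun hm => (h _ hm).2 rfl, by simp⟩

-- ===== VERDICT (by name: the statement is the Claim_ definition above) =====
theorem FullRotationPrimeCheck_spec : Claim_equal_FullRotationPrimeCheck := by
  intro n _
  unfold Spec_FullRotationPrimeCheck FullRotationPrimeCheck FullRotationPrimeCheck_alt
  by_cases h2 : n = 2
  · simp [h2]
  · by_cases h0 : n = 0
    · subst h0; decide
    · simp only [beq_iff_eq, h2, h0, if_false]
      exact pv_main n h0
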